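-- pv_equiv track=rewrite | github.com/musicmonk42/VulcanAMI_LLM | src/vulcan/world_model/world_model_core.py | _determine_tone
-- ===== SOURCE A (Python) =====
-- def _determine_tone(subject: str) -> str:
--     """Determine appropriate tone for subject."""
--     subject_lower = subject.lower()
--
--     if any(word in subject_lower for word in ['cat', 'mystery', 'night', 'moon']):
--         return 'mysterious_playful'
--     elif any(word in subject_lower for word in ['dog', 'friend', 'joy', 'sun']):
--         return 'warm_affectionate'
--     elif any(word in subject_lower for word in ['ocean', 'mountain', 'sky']):
--         return 'majestic_contemplative'
--     else:
--         return 'thoughtful_elegant'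
-- ===== SOURCE B (Python) =====
-- _KEYWORD_PRIORITY = {
--     'cat': 0, 'mystery': 0, 'night': 0, 'moon': 0,
--     'dog': 1, 'friend': 1, 'joy': 1, 'sun': 1,
--     'ocean': 2, 'mountain': 2, 'sky': 2,
-- }
--
-- _TONES = ['mysterious_playful', 'warm_affectionate',
--           'majestic_contemplative', 'thoughtful_elegant']
--
--
-- def _determine_tone(subject: str) -> str:
--     """Determine appropriate tone: min keyword priority over all matches."""
--     subject_lower = subject.lower()
--     best = 3
--     for word, priority in _KEYWORD_PRIORITY.items():
--         if priority < best and word in subject_lower: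
--             best = priority
--     return _TONES[best]
-- ===== Notes on version B (the rewrite author's own statement) =====
-- stated objective: alternative
-- what changed: Replaces the if/elif chain of grouped any()-substring tests by a single min-accumulator fold over a flat keyword-to-priority map, then indexes the tone name by the minimum priority found.
import Mathlib
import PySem

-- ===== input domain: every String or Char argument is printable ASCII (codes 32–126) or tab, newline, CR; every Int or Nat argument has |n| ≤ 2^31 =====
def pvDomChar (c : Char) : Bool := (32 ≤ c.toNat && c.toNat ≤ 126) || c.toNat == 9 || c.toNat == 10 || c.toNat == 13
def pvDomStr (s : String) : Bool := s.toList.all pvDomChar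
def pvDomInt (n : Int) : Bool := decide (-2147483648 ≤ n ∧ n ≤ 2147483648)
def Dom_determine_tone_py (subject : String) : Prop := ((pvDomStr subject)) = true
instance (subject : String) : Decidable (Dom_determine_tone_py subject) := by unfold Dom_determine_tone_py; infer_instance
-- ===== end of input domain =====

-- B replaces the if/elif chain by a min-priority fold over a flat keyword->priority map (alternative decomposition).

-- ===== PORT A =====
def determine_tone_py (subject : String) : String :=
  let subject_lower := PySem.Str.lower subject
  if ["cat", "mystery", "night", "moon"].any (fun word => PySem.Str.isIn word subject_lower) then
    "mysterious_playful"
  else if ["dog", "friend", "joy", "sun"].any (fun word => PySem.Str.isIn word subject_lower) then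
    "warm_affectionate"
  else if ["ocean", "mountain", "sky"].any (fun word => PySem.Str.isIn word subject_lower) then
    "majestic_contemplative"
  else
    "thoughtful_elegant"

-- ===== PORT B =====
def pvKeywordPriority : List (String × Nat) :=
  [("cat", 0), ("mystery", 0), ("night", 0), ("moon", 0),
   ("dog", 1), ("friend", 1), ("joy", 1), ("sun", 1),
   ("ocean", 2), ("mountain", 2), ("sky", 2)]

def pvTones : List String :=
  ["mysterious_playful", "warm_affectionate", "majestic_contemplative", "thoughtful_elegant"]

def determine_tone_py_alt (subject : String) : String :=
  let subject_lower := PySem.Str.lower subject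
  let best := pvKeywordPriority.foldl
    (fun best wp => if wp.2 < best ∧ PySem.Str.isIn wp.1 subject_lower then wp.2 else best) 3
  pvTones.getD best "thoughtful_elegant"

-- ===== PRECONDITION & SPEC =====
def Spec_determine_tone_py (subject : String) (out : String) : Prop := out = determine_tone_py_alt subject
instance (subject : String) (out : String) : Decidable (Spec_determine_tone_py subject out) := by unfold Spec_determine_tone_py; infer_instance

-- ===== CLAIM (what is proved, stated in full; the proofs are below) =====
def Claim_equal_determine_tone_py : Prop := ∀ (subject : String), Dom_determine_tone_py subject → Spec_determine_tone_py subject (determine_tone_py subject)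

-- ===== LEMMAS AND PROOFS =====
-- The fold over a group of keywords that all carry the same priority p either lowers
-- the accumulator to p (if some keyword matches and p is smaller) or leaves it unchanged.
theorem pvGroupFold (s : String) (p : Nat) (ws : List String) (b : Nat) :
    List.foldl (fun best (wp : String × Nat) =>
        if wp.2 < best ∧ PySem.Str.isIn wp.1 s then wp.2 else best) b
      (ws.map (fun w => (w, p)))
    = if p < b ∧ ws.any (fun w => PySem.Str.isIn w s) then p else b := by
  induction ws generalizing b with
  | nil => simp
  | cons w ws ih =>
    simp only [List.map_cons, List.foldl_cons]
    rw [ih]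
    by_cases hw : PySem.Chars.isIn w.toList s.toList = true <;>
    by_cases hp : p < b <;>
    by_cases ha : ∃ x ∈ ws, PySem.Chars.isIn x.toList s.toList = true <;>
    simp [hw, hp, ha]

theorem pvTableSplit : pvKeywordPriority =
    (["cat", "mystery", "night", "moon"].map (fun w => (w, 0)))
      ++ ((["dog", "friend", "joy", "sun"].map (fun w => (w, 1)))
      ++ (["ocean", "mountain", "sky"].map (fun w => (w, 2)))) := by rfl

-- ===== VERDICT (by name: the statement is the Claim_ definition above) =====
theorem determine_tone_py_spec : Claim_equal_determine_tone_py := by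
  intro subject _
  unfold Spec_determine_tone_py determine_tone_py determine_tone_py_alt pvTones
  rw [pvTableSplit]
  simp only [List.foldl_append, pvGroupFold]
  by_cases h0 : PySem.Chars.isIn ['c', 'a', 't'] (PySem.Chars.lower subject.toList) = true ∨
      PySem.Chars.isIn ['m', 'y', 's', 't', 'e', 'r', 'y'] (PySem.Chars.lower subject.toList) = true ∨
      PySem.Chars.isIn ['n', 'i', 'g', 'h', 't'] (PySem.Chars.lower subject.toList) = true ∨
      PySem.Chars.isIn ['m', 'o', 'o', 'n'] (PySem.Chars.lower subject.toList) = true <;>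
  by_cases h1 : PySem.Chars.isIn ['d', 'o', 'g'] (PySem.Chars.lower subject.toList) = true ∨
      PySem.Chars.isIn ['f', 'r', 'i', 'e', 'n', 'd'] (PySem.Chars.lower subject.toList) = true ∨
      PySem.Chars.isIn ['j', 'o', 'y'] (PySem.Chars.lower subject.toList) = true ∨
      PySem.Chars.isIn ['s', 'u', 'n'] (PySem.Chars.lower subject.toList) = true <;>
  by_cases h2 : PySem.Chars.isIn ['o', 'c', 'e', 'a', 'n'] (PySem.Chars.lower subject.toList) = true ∨
      PySem.Chars.isIn ['m', 'o', 'u', 'n', 't', 'a', 'i', 'n'] (PySem.Chars.lower subject.toList) = true ∨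
      PySem.Chars.isIn ['s', 'k', 'y'] (PySem.Chars.lower subject.toList) = true <;>
  simp [h0, h1, h2]
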